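-- pv_equiv track=rewrite | github.com/SGDilakshan/python-problems | 02_intermediate/46_palindromic_subarrays_matrix.py | count_palindromic_subarrays
-- ===== SOURCE A (Python) =====
-- def count_palindromic_subarrays(arr):
--     n = len(arr)
--     count = 0
--     for i in range(n):
--         for j in range(i, n):
--             sub = arr[i:j+1]
--             if sub == sub[::-1]:
--                 count += 1
--     return count
-- ===== SOURCE B (Python) =====
-- def count_palindromic_subarrays(arr):
--     # expand around each of the 2n-1 centers instead of testing every slice
--     n = len(arr)
--     count = 0
--     for c in range(2 * n - 1):
--         l = c // 2
--         r = l + c % 2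
--         while l >= 0 and r < n and arr[l] == arr[r]:
--             count += 1
--             l -= 1
--             r += 1
--     return count
-- ===== Notes on version B (the rewrite author's own statement) =====
-- stated objective: faster
-- what changed: Replaced the O(n^3) scan of all slices (each checked against its reversal) by expand-around-center over the 2n-1 centers, counting palindromic extensions until the first endpoint mismatch.
import Mathlib
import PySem

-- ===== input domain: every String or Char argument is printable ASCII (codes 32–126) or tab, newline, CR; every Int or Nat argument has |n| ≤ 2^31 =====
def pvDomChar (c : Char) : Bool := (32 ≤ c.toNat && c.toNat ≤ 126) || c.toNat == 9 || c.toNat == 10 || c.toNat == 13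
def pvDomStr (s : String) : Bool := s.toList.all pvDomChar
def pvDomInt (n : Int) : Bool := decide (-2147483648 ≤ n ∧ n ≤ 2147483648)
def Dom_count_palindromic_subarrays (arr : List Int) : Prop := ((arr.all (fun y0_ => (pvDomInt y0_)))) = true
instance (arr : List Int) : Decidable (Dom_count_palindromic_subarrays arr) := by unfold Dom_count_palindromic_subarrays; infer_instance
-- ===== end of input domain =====

-- B replaces A's check of every slice against its reversal by expand-around-center over the 2n-1 centers (faster).

-- ===== PORT A =====
def count_palindromic_subarrays (arr : List Int) : Int :=
  let n : Int := arr.length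
  (PySem.List.pyRange 0 n 1).foldl (fun count i =>
    (PySem.List.pyRange i n 1).foldl (fun count j =>
      let sub := PySem.List.slice arr (some i) (some (j + 1))
      if PySem.List.slice? sub none none (-1) = some sub then count + 1 else count)
      count) 0

-- ===== PORT B =====
-- the while-loop of B: expands from (l, r) while in bounds and the endpoints match; returns the number of count increments
def pvExpand (arr : List Int) (l r : Int) : Int :=
  if h : 0 ≤ l ∧ r < (arr.length : Int) ∧ PySem.List.pyGetD arr l 0 = PySem.List.pyGetD arr r 0 then
    1 + pvExpand arr (l - 1) (r + 1)
  else 0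
termination_by ((arr.length : Int) - r).toNat
decreasing_by omega

def count_palindromic_subarrays_alt (arr : List Int) : Int :=
  let n : Int := arr.length
  (PySem.List.pyRange 0 (2 * n - 1) 1).foldl (fun count c =>
    let l := PySem.Int.floordiv c 2
    let r := l + PySem.Int.mod c 2
    count + pvExpand arr l r) 0

-- ===== PRECONDITION & SPEC =====
def Spec_count_palindromic_subarrays (arr : List Int) (out : Int) : Prop := out = count_palindromic_subarrays_alt arr
instance (arr : List Int) (out : Int) : Decidable (Spec_count_palindromic_subarrays arr out) := by unfold Spec_count_palindromic_subarrays; infer_instance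

-- ===== CLAIM (what is proved, stated in full; the proofs are below) =====
def Claim_equal_count_palindromic_subarrays : Prop := ∀ (arr : List Int), Dom_count_palindromic_subarrays arr → Spec_count_palindromic_subarrays arr (count_palindromic_subarrays arr)

-- ===== LEMMAS AND PROOFS =====

-- palc arr i j : the subarray arr[i..j] (inclusive, Nat indices) is a palindrome
def palc (arr : List Int) (i j : Nat) : Bool :=
  if j ≤ i then true
  else (arr.getD i 0 == arr.getD j 0) && palc arr (i + 1) (j - 1)
termination_by j - i

-- indicator used by both counting characterisations
def palInd (arr : List Int) (i j : Nat) : Int := if palc arr i j then 1 else 0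

theorem pal_wrap (a b : Int) (m : List Int) :
    (a :: (m ++ [b])).reverse = a :: (m ++ [b]) ↔ a = b ∧ m.reverse = m := by
  constructor
  · intro h; simp at h; exact ⟨h.1.symm, h.2.1⟩
  · rintro ⟨rfl, h⟩; simp [h]

theorem pal_slice_aux (arr : List Int) : ∀ d i j, j - i ≤ d → i ≤ j → j < arr.length →
    (((arr.drop i).take (j + 1 - i)).reverse = (arr.drop i).take (j + 1 - i)
      ↔ palc arr i j = true) := by
  intro d
  induction d with
  | zero =>
    intro i j hd hij hj
    have hji : i = j := by omega
    subst hji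
    have h1 : (arr.drop i).take (i + 1 - i) = [arr[i]] := by
      have he : i + 1 - i = 1 := by omega
      rw [he]; exact List.take_one_drop_eq_of_lt_length hj
    rw [h1, palc]
    simp
  | succ d ih =>
    intro i j hd hij hj
    by_cases hcase : i = j
    · subst hcase
      have h1 : (arr.drop i).take (i + 1 - i) = [arr[i]] := by
        have he : i + 1 - i = 1 := by omega
        rw [he]; exact List.take_one_drop_eq_of_lt_length hj
      rw [h1, palc]
      simp
    · have hij' : i < j := lt_of_le_of_ne hij hcase
      have hi : i < arr.length := by omega
      have hmid : (arr.drop (i+1)).take (j - i - 1) ++ [arr[j]]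
          = (arr.drop (i+1)).take (j - i) := by
        have h2 : j - i = (j - i - 1) + 1 := by omega
        rw [h2, List.take_add_one, List.getElem?_drop]
        have h3 : i + 1 + (j - i - 1) = j := by omega
        rw [h3, List.getElem?_eq_getElem hj]
        simp
      have hdecomp : (arr.drop i).take (j + 1 - i)
          = arr[i] :: ((arr.drop (i+1)).take (j - i - 1) ++ [arr[j]]) := by
        rw [List.drop_eq_getElem_cons hi]
        have h4 : j + 1 - i = (j - i) + 1 := by omega
        rw [h4, List.take_succ_cons, hmid]
      rw [hdecomp, pal_wrap, palc]
      simp only [if_neg (by omega : ¬ j ≤ i), Bool.and_eq_true, beq_iff_eq,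
        List.getD_eq_getElem arr 0 hi, List.getD_eq_getElem arr 0 hj]
      constructor
      · rintro ⟨h5, h6⟩
        refine ⟨h5, ?_⟩
        by_cases h7 : j = i + 1
        · rw [palc]; simp [h7]
        · have h8 : (arr.drop (i+1)).take (j - i - 1)
              = (arr.drop (i+1)).take ((j-1) + 1 - (i+1)) := by
            congr 1; omega
          rw [← ih (i+1) (j-1) (by omega) (by omega) (by omega), ← h8]
          exact h6
      · rintro ⟨h5, h6⟩
        refine ⟨h5, ?_⟩
        by_cases h7 : j = i + 1
        · have h9 : j - i - 1 = 0 := by omega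
          simp [h9]
        · have h8 : (arr.drop (i+1)).take (j - i - 1)
              = (arr.drop (i+1)).take ((j-1) + 1 - (i+1)) := by
            congr 1; omega
          rw [h8, ih (i+1) (j-1) (by omega) (by omega) (by omega)]
          exact h6

-- the slice palindrome test of A agrees with palc
theorem pal_slice (arr : List Int) (i j : Nat) (hij : i ≤ j) (hj : j < arr.length) :
    (((PySem.List.slice arr (some (i : Int)) (some ((j : Int) + 1))).reverse
      = PySem.List.slice arr (some (i : Int)) (some ((j : Int) + 1)))
    ↔ palc arr i j = true) := by
  have hc : ((j : Int) + 1) = (((j + 1 : Nat)) : Int) := by push_cast; ring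
  rw [hc, PySem.List.slice_natCast]
  exact pal_slice_aux arr (j - i) i j (le_refl _) hij hj

theorem pvExpand_nonneg (arr : List Int) (l r : Int) : 0 ≤ pvExpand arr l r := by
  rw [pvExpand]
  split_ifs with h
  · have := pvExpand_nonneg arr (l - 1) (r + 1)
    omega
  · omega
termination_by ((arr.length : Int) - r).toNat
decreasing_by omega

-- matching condition at offset t from center (l, r)
def pvQ (arr : List Int) (l r : Int) (t : Nat) : Prop :=
  0 ≤ l - t ∧ r + t < (arr.length : Int) ∧
    PySem.List.pyGetD arr (l - t) 0 = PySem.List.pyGetD arr (r + t) 0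

theorem pvQ_shift (arr : List Int) (l r : Int) (t : Nat) :
    pvQ arr (l - 1) (r + 1) t ↔ pvQ arr l r (t + 1) := by
  unfold pvQ
  constructor
  · rintro ⟨h1, h2, h3⟩
    refine ⟨by push_cast; omega, by push_cast at h2 ⊢; omega, ?_⟩
    have e1 : l - 1 - (t : Int) = l - ((t : Nat) + 1 : Nat) := by push_cast; ring
    have e2 : r + 1 + (t : Int) = r + ((t : Nat) + 1 : Nat) := by push_cast; ring
    rw [e1, e2] at h3; exact h3
  · rintro ⟨h1, h2, h3⟩
    refine ⟨by push_cast at h1 ⊢; omega, by push_cast at h2 ⊢; omega, ?_⟩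
    have e1 : l - 1 - (t : Int) = l - ((t : Nat) + 1 : Nat) := by push_cast; ring
    have e2 : r + 1 + (t : Int) = r + ((t : Nat) + 1 : Nat) := by push_cast; ring
    rw [e1, e2]; exact h3

-- pvExpand counts exactly the prefix of offsets whose endpoints keep matching
theorem pvExpand_iff (arr : List Int) (k : Nat) (l r : Int) :
    ((k : Int) < pvExpand arr l r ↔ ∀ t : Nat, t ≤ k → pvQ arr l r t) := by
  induction k generalizing l r with
  | zero =>
    rw [pvExpand]
    split_ifs with h
    · have := pvExpand_nonneg arr (l - 1) (r + 1)
      constructor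
      · intro _ t ht
        have ht0 : t = 0 := Nat.le_zero.mp ht
        subst ht0
        simpa [pvQ] using h
      · intro _; omega
    · constructor
      · intro hlt; omega
      · intro hall
        exact absurd (by simpa [pvQ] using hall 0 (le_refl 0)) h
  | succ k ih =>
    rw [pvExpand]
    split_ifs with h
    · have hiff := ih (l - 1) (r + 1)
      constructor
      · intro hlt t ht
        rcases Nat.eq_zero_or_pos t with h0 | hpos
        · subst h0; simpa [pvQ] using h
        · obtain ⟨t', rfl⟩ : ∃ t', t = t' + 1 := ⟨t - 1, by omega⟩
          rw [← pvQ_shift]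
          exact hiff.mp (by push_cast at hlt ⊢; omega) t' (by omega)
      · intro hall
        have hlt : (k : Int) < pvExpand arr (l - 1) (r + 1) := by
          apply hiff.mpr
          intro t ht
          rw [pvQ_shift]
          exact hall (t + 1) (by omega)
        push_cast; omega
    · constructor
      · intro hlt; omega
      · intro hall
        exact absurd (by simpa [pvQ] using hall 0 (by omega)) h

-- palindromicity along a center line is exactly a chain of endpoint matches
theorem pal_chain (arr : List Int) (l0 r0 : Nat) (hc : r0 = l0 ∨ r0 = l0 + 1) :
    ∀ k : Nat, k ≤ l0 → r0 + k < arr.length →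
    (palc arr (l0 - k) (r0 + k) = true ↔
      ∀ t : Nat, t ≤ k → arr.getD (l0 - t) 0 = arr.getD (r0 + t) 0) := by
  have base : palc arr l0 r0 = true ↔ arr.getD l0 0 = arr.getD r0 0 := by
    rcases hc with h | h
    · rw [h, palc]; simp
    · rw [h, palc, if_neg (by omega : ¬ l0 + 1 ≤ l0)]
      have h2 : palc arr (l0 + 1) (l0 + 1 - 1) = true := by rw [palc]; simp
      rw [h2]
      simp
  intro k
  induction k with
  | zero =>
    intro _ _
    simp only [Nat.sub_zero, Nat.add_zero]
    rw [base]
    constructor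
    · intro h t ht
      have ht0 : t = 0 := by omega
      subst ht0
      simpa using h
    · intro h
      simpa using h 0 (le_refl 0)
  | succ k ih =>
    intro hk hr
    have hle : r0 ≥ l0 := by omega
    rw [palc]
    simp only [if_neg (by omega : ¬ r0 + (k + 1) ≤ l0 - (k + 1))]
    have e1 : l0 - (k + 1) + 1 = l0 - k := by omega
    have e2 : r0 + (k + 1) - 1 = r0 + k := by omega
    rw [e1, e2, Bool.and_eq_true, beq_iff_eq, ih (by omega) (by omega)]
    constructor
    · rintro ⟨h1, h2⟩ t ht
      rcases Nat.lt_or_ge t (k + 1) with h3 | h3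
      · exact h2 t (by omega)
      · have ht1 : t = k + 1 := by omega
        subst ht1; exact h1
    · intro h
      exact ⟨h (k + 1) (le_refl _), fun t ht => h t (by omega)⟩

-- bridge: pvQ in terms of List.getD for Nat-indexed centers
theorem pvQ_nat (arr : List Int) (l0 r0 t : Nat) (ht : t ≤ l0) :
    (pvQ arr (l0 : Int) (r0 : Int) t ↔
      (r0 + t < arr.length ∧ arr.getD (l0 - t) 0 = arr.getD (r0 + t) 0)) := by
  unfold pvQ
  have e1 : (l0 : Int) - (t : Int) = ((l0 - t : Nat) : Int) := by omega
  have e2 : (r0 : Int) + (t : Int) = ((r0 + t : Nat) : Int) := by omega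
  rw [e1, e2, PySem.List.pyGetD_natCast, PySem.List.pyGetD_natCast]
  constructor
  · rintro ⟨_, h2, h3⟩; exact ⟨by omega, h3⟩
  · rintro ⟨h2, h3⟩; exact ⟨by omega, by omega, h3⟩

-- per-center: offset k is counted by pvExpand iff (c-j, j) with j = center+k is a palindromic pair
theorem center_k_iff (arr : List Int) (c k : Nat)
    (hl : c / 2 + c % 2 + k < arr.length) :
    ((c / 2 + c % 2 + k ≤ c ∧ palc arr (c - (c / 2 + c % 2 + k)) (c / 2 + c % 2 + k) = true)
      ↔ (k : Int) < pvExpand arr ((c / 2 : Nat) : Int) ((c / 2 + c % 2 : Nat) : Int)) := by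
  have hc : c / 2 + c % 2 = c / 2 ∨ c / 2 + c % 2 = c / 2 + 1 := by omega
  rw [pvExpand_iff]
  constructor
  · rintro ⟨h1, h2⟩ t ht
    have hk : k ≤ c / 2 := by omega
    have hcj : c - (c / 2 + c % 2 + k) = c / 2 - k := by omega
    rw [hcj] at h2
    have hall := (pal_chain arr (c / 2) (c / 2 + c % 2) hc k hk hl).mp h2
    rw [pvQ_nat arr (c / 2) (c / 2 + c % 2) t (by omega)]
    exact ⟨by omega, hall t ht⟩
  · intro hall
    have hqk := hall k (le_refl k)
    have hk : k ≤ c / 2 := by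
      have := hqk.1
      omega
    have hcj : c - (c / 2 + c % 2 + k) = c / 2 - k := by omega
    refine ⟨by omega, ?_⟩
    rw [hcj]
    refine (pal_chain arr (c / 2) (c / 2 + c % 2) hc k hk hl).mpr (fun t ht => ?_)
    exact ((pvQ_nat arr (c / 2) (c / 2 + c % 2) t (by omega)).mp (hall t ht)).2

-- per-center: pvExpand counts exactly the palindromic pairs with this center
theorem center_eq_sum (arr : List Int) (c : Nat) :
    pvExpand arr ((c / 2 : Nat) : Int) (((c / 2 + c % 2 : Nat)) : Int) =
      ∑ j ∈ Finset.range arr.length,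
        (if c / 2 + c % 2 ≤ j ∧ j ≤ c ∧ palc arr (c - j) j then (1 : Int) else 0) := by
  have he := pvExpand_nonneg arr ((c / 2 : Nat) : Int) (((c / 2 + c % 2 : Nat)) : Int)
  rw [Finset.sum_boole]
  have hfilter : (Finset.range arr.length).filter
        (fun j => c / 2 + c % 2 ≤ j ∧ j ≤ c ∧ palc arr (c - j) j)
      = Finset.Ico (c / 2 + c % 2)
          ((c / 2 + c % 2) + (pvExpand arr ((c / 2 : Nat) : Int) (((c / 2 + c % 2 : Nat)) : Int)).toNat) := by
    ext j
    simp only [Finset.mem_filter, Finset.mem_range, Finset.mem_Ico]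
    constructor
    · rintro ⟨hj, hr, hc', hp⟩
      refine ⟨hr, ?_⟩
      obtain ⟨k, rfl⟩ : ∃ k, j = c / 2 + c % 2 + k := ⟨j - (c / 2 + c % 2), by omega⟩
      have := (center_k_iff arr c k hj).mp ⟨hc', hp⟩
      omega
    · rintro ⟨hr, hlt⟩
      obtain ⟨k, rfl⟩ : ∃ k, j = c / 2 + c % 2 + k := ⟨j - (c / 2 + c % 2), by omega⟩
      have hke : (k : Int) < pvExpand arr ((c / 2 : Nat) : Int) (((c / 2 + c % 2 : Nat)) : Int) := by
        omega
      have hq := (pvExpand_iff arr k ((c / 2 : Nat) : Int) (((c / 2 + c % 2 : Nat)) : Int)).mp hke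
        k (le_refl k)
      have hjlen : c / 2 + c % 2 + k < arr.length := by
        have := hq.2.1
        push_cast at this
        omega
      have := (center_k_iff arr c k hjlen).mpr hke
      exact ⟨hjlen, hr, this.1, this.2⟩
  rw [hfilter, Nat.card_Ico]
  omega

theorem list_range_sum (m : Nat) (f : Nat → Int) :
    ((List.range m).map f).sum = ∑ i ∈ Finset.range m, f i := by
  simp [Finset.sum, Finset.range_val, Multiset.range]

-- A equals the double sum of palindrome indicators over pairs i ≤ j
theorem A_eq_sum (arr : List Int) :
    count_palindromic_subarrays arr =
      ∑ i ∈ Finset.range arr.length, ∑ j ∈ Finset.Ico i arr.length, palInd arr i j := by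
  unfold count_palindromic_subarrays
  simp only [PySem.List.slice?_none_none_neg_one, Option.some.injEq]
  have hside : ∀ (acc : Int), ∀ x ∈ PySem.List.pyRange 0 (arr.length : Int) 1,
      (PySem.List.pyRange x (arr.length : Int) 1).foldl (fun count j =>
        if (PySem.List.slice arr (some x) (some (j + 1))).reverse
            = PySem.List.slice arr (some x) (some (j + 1)) then count + 1 else count) acc
      = acc + ((PySem.List.pyRange x (arr.length : Int) 1).map (fun j =>
          if (PySem.List.slice arr (some x) (some (j + 1))).reverse
              = PySem.List.slice arr (some x) (some (j + 1)) then (1 : Int) else 0)).sum := by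
    intro acc x _
    rw [PySem.List.foldl_congr_mem _ _ (fun count j =>
        count + (if (PySem.List.slice arr (some x) (some (j + 1))).reverse
            = PySem.List.slice arr (some x) (some (j + 1)) then (1 : Int) else 0)) acc
        (by intro c y _; beta_reduce; split_ifs <;> omega)]
    rw [PySem.List.foldl_add]
  rw [PySem.List.foldl_congr_mem _ _ (fun count x =>
      count + ((PySem.List.pyRange x (arr.length : Int) 1).map (fun j =>
        if (PySem.List.slice arr (some x) (some (j + 1))).reverse
            = PySem.List.slice arr (some x) (some (j + 1)) then (1 : Int) else 0)).sum) 0 hside]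
  rw [PySem.List.foldl_add]
  rw [PySem.List.pyRange_one]
  simp only [List.map_map, zero_add, Int.sub_zero, Int.toNat_natCast]
  rw [list_range_sum]
  apply Finset.sum_congr rfl
  intro i hi
  simp only [Finset.mem_range] at hi
  simp only [Function.comp_apply]
  rw [PySem.List.pyRange_one]
  simp only [List.map_map]
  have harg : ((arr.length : Int) - (i : Int)).toNat = arr.length - i := by omega
  rw [harg, list_range_sum, Finset.sum_Ico_eq_sum_range]
  apply Finset.sum_congr rfl
  intro k hk
  simp only [Finset.mem_range] at hk
  simp only [Function.comp_apply]
  have hcast : (i : Int) + (k : Int) = ((i + k : Nat) : Int) := by push_cast; ring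
  rw [hcast]
  unfold palInd
  rw [if_congr (pal_slice arr i (i + k) (by omega) (by omega)) rfl rfl]

-- B equals the sum of pvExpand over the 2n-1 centers
theorem B_eq_sum (arr : List Int) :
    count_palindromic_subarrays_alt arr =
      ∑ c ∈ Finset.range (2 * arr.length - 1),
        pvExpand arr ((c / 2 : Nat) : Int) (((c / 2 + c % 2 : Nat)) : Int) := by
  unfold count_palindromic_subarrays_alt
  simp only []
  rw [PySem.List.foldl_add]
  rw [PySem.List.pyRange_one]
  simp only [List.map_map, zero_add, Int.sub_zero]
  have harg : (2 * (arr.length : Int) - 1).toNat = 2 * arr.length - 1 := by omega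
  rw [harg, list_range_sum]
  apply Finset.sum_congr rfl
  intro c hc
  simp only [Function.comp_apply]
  have h1 : PySem.Int.floordiv ((c : Nat) : Int) 2 = ((c / 2 : Nat) : Int) := by
    exact_mod_cast PySem.Int.floordiv_natCast c 2
  have h2 : PySem.Int.mod ((c : Nat) : Int) 2 = ((c % 2 : Nat) : Int) := by
    exact_mod_cast PySem.Int.mod_natCast c 2
  have h3 : ((c / 2 : Nat) : Int) + ((c % 2 : Nat) : Int) = ((c / 2 + c % 2 : Nat) : Int) := by
    push_cast
    ring
  rw [h1, h2, h3]

-- reindex the per-center double sum into A's triangle double sum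
theorem sum_swap_eq (arr : List Int) :
    ∑ c ∈ Finset.range (2 * arr.length - 1), ∑ j ∈ Finset.range arr.length,
        (if c / 2 + c % 2 ≤ j ∧ j ≤ c ∧ palc arr (c - j) j then (1 : Int) else 0)
      = ∑ i ∈ Finset.range arr.length, ∑ j ∈ Finset.Ico i arr.length, palInd arr i j := by
  have hA : ∀ i ∈ Finset.range arr.length,
      ∑ j ∈ Finset.Ico i arr.length, palInd arr i j
        = ∑ j ∈ Finset.range arr.length, (if i ≤ j then palInd arr i j else 0) := by
    intro i _
    rw [← Finset.sum_filter]
    apply Finset.sum_congr _ (fun _ _ => rfl)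
    ext j
    simp only [Finset.mem_Ico, Finset.mem_filter, Finset.mem_range]
    omega
  have hAside : ∑ i ∈ Finset.range arr.length, ∑ j ∈ Finset.Ico i arr.length, palInd arr i j
      = ∑ j ∈ Finset.range arr.length, ∑ i ∈ Finset.range (j + 1), palInd arr i j := by
    rw [Finset.sum_congr rfl hA, Finset.sum_comm]
    apply Finset.sum_congr rfl
    intro j hj
    simp only [Finset.mem_range] at hj
    rw [← Finset.sum_filter]
    apply Finset.sum_congr _ (fun _ _ => rfl)
    ext i
    simp only [Finset.mem_filter, Finset.mem_range]
    omega
  rw [hAside, Finset.sum_comm]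
  apply Finset.sum_congr rfl
  intro j hj
  simp only [Finset.mem_range] at hj
  have hsub : Finset.Ico j (2 * j + 1) ⊆ Finset.range (2 * arr.length - 1) := by
    intro c hc
    simp only [Finset.mem_Ico] at hc
    simp only [Finset.mem_range]
    omega
  have hvan : ∀ c ∈ Finset.range (2 * arr.length - 1), c ∉ Finset.Ico j (2 * j + 1) →
      (if c / 2 + c % 2 ≤ j ∧ j ≤ c ∧ palc arr (c - j) j then (1 : Int) else 0) = 0 := by
    intro c _ hc
    simp only [Finset.mem_Ico] at hc
    rw [if_neg]
    rintro ⟨h1, h2, _⟩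
    omega
  rw [← Finset.sum_subset hsub hvan]
  have hmid : ∀ c ∈ Finset.Ico j (2 * j + 1),
      (if c / 2 + c % 2 ≤ j ∧ j ≤ c ∧ palc arr (c - j) j then (1 : Int) else 0)
        = palInd arr (c - j) j := by
    intro c hc
    simp only [Finset.mem_Ico] at hc
    unfold palInd
    apply if_congr _ rfl rfl
    constructor
    · rintro ⟨_, _, h3⟩; exact h3
    · intro h3
      exact ⟨by omega, by omega, h3⟩
  rw [Finset.sum_congr rfl hmid, Finset.sum_Ico_eq_sum_range]
  have h5 : 2 * j + 1 - j = j + 1 := by omega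
  rw [h5]
  apply Finset.sum_congr rfl
  intro k _
  congr 1
  omega

-- ===== VERDICT (by name: the statement is the Claim_ definition above) =====
theorem count_palindromic_subarrays_spec : Claim_equal_count_palindromic_subarrays := by
  intro arr _
  show count_palindromic_subarrays arr = count_palindromic_subarrays_alt arr
  rw [A_eq_sum, B_eq_sum, Finset.sum_congr rfl (fun c _ => center_eq_sum arr c)]
  exact (sum_swap_eq arr).symm
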